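-- pv_equiv track=rewrite | github.com/AlexSR2590/logica_python | 3-Ejercicios-logica/ejercicio61.py | sonParesImpares
-- ===== SOURCE A (Python) =====
-- def sonParesImpares(numeros):
--     pares = []
--     impares = []
--     resultado = ""
--     for numero in numeros:
--         if numero % 2 == 0:
--             pares.append(numero)
--         else:
--             impares.append(numero)
--     if pares and impares:
--         resultado = "Los números son pares e impares."
--     elif pares:
--         resultado = "Los números son pares."
--     elif impares:
--         resultado = "Los números son impares."
--     else:
--         resultado = "La lista está vacia."
--     return resultado
-- ===== SOURCE B (Python) =====
-- def sonParesImpares(numeros):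
--     hayPares = any(n % 2 == 0 for n in numeros)
--     hayImpares = any(n % 2 != 0 for n in numeros)
--     if hayPares and hayImpares:
--         return "Los números son pares e impares."
--     elif hayPares:
--         return "Los números son pares."
--     elif hayImpares:
--         return "Los números son impares."
--     else:
--         return "La lista está vacia."
-- ===== Notes on version B (the rewrite author's own statement) =====
-- stated objective: simpler
-- what changed: B replaces the loop that builds two lists (used only for truthiness) with two short-circuiting any() scans producing boolean flags, and returns directly from each branch.
import Mathlib
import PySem

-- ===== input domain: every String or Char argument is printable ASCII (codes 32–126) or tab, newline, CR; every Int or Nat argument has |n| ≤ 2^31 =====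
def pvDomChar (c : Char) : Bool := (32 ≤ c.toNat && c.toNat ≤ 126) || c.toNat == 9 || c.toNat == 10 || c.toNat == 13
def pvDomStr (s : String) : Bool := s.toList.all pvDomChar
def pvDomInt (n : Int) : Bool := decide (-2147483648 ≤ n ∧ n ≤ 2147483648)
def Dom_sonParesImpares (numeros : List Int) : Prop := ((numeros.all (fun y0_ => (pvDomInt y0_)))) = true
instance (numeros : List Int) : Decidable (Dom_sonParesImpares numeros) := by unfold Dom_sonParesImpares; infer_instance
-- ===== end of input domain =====

-- B replaces the list-building loop with two short-circuiting boolean scans (simpler, O(1) space).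

-- ===== PORT A =====
-- the for-loop appending each number to pares or impares, state = (pares, impares)
def sonParesImpares (numeros : List Int) : String :=
  let st := numeros.foldl
    (fun (st : List Int × List Int) numero =>
      if PySem.Int.mod numero 2 == 0 then (st.1 ++ [numero], st.2)
      else (st.1, st.2 ++ [numero]))
    ([], [])
  let resultado :=
    if st.1 ≠ [] ∧ st.2 ≠ [] then "Los números son pares e impares."
    else if st.1 ≠ [] then "Los números son pares."
    else if st.2 ≠ [] then "Los números son impares." 
    else "La lista está vacia."
  resultado

-- ===== PORT B =====
def sonParesImpares_alt (numeros : List Int) : String :=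
  let hayPares := numeros.any (fun n => PySem.Int.mod n 2 == 0)
  let hayImpares := numeros.any (fun n => PySem.Int.mod n 2 != 0)
  if hayPares && hayImpares then "Los números son pares e impares."
  else if hayPares then "Los números son pares."
  else if hayImpares then "Los números son impares." 
  else "La lista está vacia."

-- ===== PRECONDITION & SPEC =====
def Spec_sonParesImpares (numeros : List Int) (out : String) : Prop := out = sonParesImpares_alt numeros
instance (numeros : List Int) (out : String) : Decidable (Spec_sonParesImpares numeros out) := by unfold Spec_sonParesImpares; infer_instance

-- ===== CLAIM (what is proved, stated in full; the proofs are below) =====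
def Claim_equal_sonParesImpares : Prop := ∀ (numeros : List Int), Dom_sonParesImpares numeros → Spec_sonParesImpares numeros (sonParesImpares numeros)

-- ===== LEMMAS AND PROOFS =====

-- A's loop appends the even elements to the first accumulator and the odd ones to the second
theorem pv_loop_eq (numeros : List Int) (p i : List Int) :
    numeros.foldl
      (fun (st : List Int × List Int) numero =>
        if PySem.Int.mod numero 2 == 0 then (st.1 ++ [numero], st.2)
        else (st.1, st.2 ++ [numero]))
      (p, i)
    = (p ++ numeros.filter (fun n => PySem.Int.mod n 2 == 0),
       i ++ numeros.filter (fun n => !(PySem.Int.mod n 2 == 0))) := by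
  induction numeros generalizing p i with
  | nil => simp
  | cons x xs ih =>
    simp only [List.foldl_cons, List.filter_cons]
    cases h : (PySem.Int.mod x 2 == 0) with
    | true =>
      simp only [h, if_true, Bool.not_true, if_false, Bool.false_eq_true, ih,
        List.append_assoc, List.singleton_append]
    | false =>
      simp only [h, if_true, Bool.not_false, if_false, Bool.false_eq_true, ih,
        List.append_assoc, List.singleton_append]

theorem pv_filter_ne_any (l : List Int) (f : Int → Bool) :
    (l.filter f ≠ []) ↔ (l.any f = true) := by
  simp [List.filter_eq_nil_iff, List.any_eq_true]

-- ===== VERDICT (by name: the statement is the Claim_ definition above) =====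
theorem sonParesImpares_spec : Claim_equal_sonParesImpares := by
  intro numeros _
  unfold Spec_sonParesImpares sonParesImpares sonParesImpares_alt
  have e1 : (numeros.filter (fun n => PySem.Int.mod n 2 == 0) ≠ [])
      ↔ numeros.any (fun n => PySem.Int.mod n 2 == 0) = true :=
    pv_filter_ne_any numeros _
  have e2 : (numeros.filter (fun n => !(PySem.Int.mod n 2 == 0)) ≠ [])
      ↔ numeros.any (fun n => PySem.Int.mod n 2 != 0) = true :=
    pv_filter_ne_any numeros _
  have hA : (numeros.filter (fun n => PySem.Int.mod n 2 == 0) ≠ []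
        ∧ numeros.filter (fun n => !(PySem.Int.mod n 2 == 0)) ≠ [])
      ↔ (numeros.any (fun n => PySem.Int.mod n 2 == 0)
          && numeros.any (fun n => PySem.Int.mod n 2 != 0)) = true := by
    rw [e1, e2, Bool.and_eq_true]
  simp only [pv_loop_eq, List.nil_append, e1, e2, Bool.and_eq_true]
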